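-- pv_equiv track=rewrite | github.com/mkrams/pdf-by-mk | backend/app/mini_agent.py | _expand_page_range
-- ===== SOURCE A (Python) =====
-- def _expand_page_range(base_pages: list[int], total_pages: int, margin: int = 2) -> list[int]:
--     """Expand a list of page numbers by adding surrounding pages."""
--     if not base_pages:
--         return []
--     all_pages = set()
--     for p in base_pages:
--         for offset in range(-margin, margin + 1):
--             candidate = p + offset
--             if 1 <= candidate <= total_pages:
--                 all_pages.add(candidate)
--     return sorted(all_pages)
-- ===== SOURCE B (Python) =====
-- def _expand_page_range(base_pages: list[int], total_pages: int, margin: int = 2) -> list[int]: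
--     """Expand a list of page numbers by adding surrounding pages."""
--     result = []
--     nxt = 1  # next page not yet emitted; everything below nxt that is covered is already in result
--     for p in sorted(base_pages):
--         lo = max(nxt, p - margin, 1)
--         hi = min(p + margin, total_pages)
--         result.extend(range(lo, hi + 1))
--         nxt = max(nxt, hi + 1)
--     return result
-- ===== Notes on version B (the rewrite author's own statement) =====
-- stated objective: faster
-- what changed: Instead of inserting every candidate page of every base page into a set and sorting it, B sorts the base pages once and does a single cursor sweep that emits only the not-yet-emitted part of each clamped interval [max(1,p-margin), min(total_pages,p+margin)], producing the sorted unique list directly.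
import Mathlib
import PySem

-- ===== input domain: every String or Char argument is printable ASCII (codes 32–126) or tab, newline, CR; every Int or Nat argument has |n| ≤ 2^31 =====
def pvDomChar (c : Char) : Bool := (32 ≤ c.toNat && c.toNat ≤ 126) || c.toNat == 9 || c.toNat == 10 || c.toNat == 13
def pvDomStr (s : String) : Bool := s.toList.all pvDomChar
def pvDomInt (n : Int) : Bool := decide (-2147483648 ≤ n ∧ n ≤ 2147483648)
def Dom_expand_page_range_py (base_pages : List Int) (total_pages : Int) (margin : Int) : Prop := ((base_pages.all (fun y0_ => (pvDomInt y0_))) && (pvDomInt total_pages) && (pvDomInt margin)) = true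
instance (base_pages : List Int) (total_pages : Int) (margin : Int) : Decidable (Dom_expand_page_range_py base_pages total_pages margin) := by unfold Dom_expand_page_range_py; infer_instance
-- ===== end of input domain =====

-- B replaces A's per-page candidate loop + set + sort by a single cursor sweep over the
-- sorted base pages that emits each clamped interval's still-unseen part, already in order.

-- ===== PORT A =====
def expand_page_range_py (base_pages : List Int) (total_pages : Int) (margin : Int) : List Int :=
  if base_pages = [] then []
  else
    let all_pages : PySem.Set Int :=
      base_pages.foldl
        (fun s p =>
          (PySem.List.pyRange (-margin) (margin + 1) 1).foldl
            (fun s offset =>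
              let candidate := p + offset
              if 1 ≤ candidate ∧ candidate ≤ total_pages then PySem.Set.add s candidate else s)
            s)
        PySem.Set.empty
    PySem.List.sorted all_pages (fun x => x) false

-- ===== PORT B =====
def expand_page_range_py_alt (base_pages : List Int) (total_pages : Int) (margin : Int) : List Int :=
  ((PySem.List.sorted base_pages (fun x => x) false).foldl
    (fun st p =>
      let lo := max (max st.2 (p - margin)) 1
      let hi := min (p + margin) total_pages
      (st.1 ++ PySem.List.pyRange lo (hi + 1) 1, max st.2 (hi + 1)))
    ([], 1)).1

-- ===== PRECONDITION & SPEC =====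
def Spec_expand_page_range_py (base_pages : List Int) (total_pages : Int) (margin : Int) (out : List Int) : Prop := out = expand_page_range_py_alt base_pages total_pages margin
instance (base_pages : List Int) (total_pages : Int) (margin : Int) (out : List Int) : Decidable (Spec_expand_page_range_py base_pages total_pages margin out) := by unfold Spec_expand_page_range_py; infer_instance

-- ===== CLAIM (what is proved, stated in full; the proofs are below) =====
def Claim_equal_expand_page_range_py : Prop := ∀ (base_pages : List Int) (total_pages : Int) (margin : Int), Dom_expand_page_range_py base_pages total_pages margin → Spec_expand_page_range_py base_pages total_pages margin (expand_page_range_py base_pages total_pages margin)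

-- ===== LEMMAS AND PROOFS =====

-- membership in A's inner loop (adding all in-range candidates p+offset for offsets from l)
theorem pv_mem_inner (total p : Int) :
    ∀ (l : List Int) (s : PySem.Set Int) (x : Int),
      (x ∈ l.foldl
          (fun s offset =>
            let candidate := p + offset
            if 1 ≤ candidate ∧ candidate ≤ total then PySem.Set.add s candidate else s) s)
        ↔ x ∈ s ∨ ∃ o ∈ l, x = p + o ∧ 1 ≤ x ∧ x ≤ total := by
  intro l
  induction l with
  | nil => simp
  | cons o t ih =>
    intro s x
    simp only [List.foldl_cons]
    split_ifs with h
    · rw [ih]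
      simp only [PySem.Set.mem_add, List.mem_cons]
      constructor
      · rintro ((hs | rfl) | ⟨o', ho', rfl, hx⟩)
        · exact Or.inl hs
        · exact Or.inr ⟨o, Or.inl rfl, rfl, h⟩
        · exact Or.inr ⟨o', Or.inr ho', rfl, hx⟩
      · rintro (hs | ⟨o', (rfl | ho'), rfl, hx⟩)
        · exact Or.inl (Or.inl hs)
        · exact Or.inl (Or.inr rfl)
        · exact Or.inr ⟨o', ho', rfl, hx⟩
    · rw [ih]
      simp only [List.mem_cons]
      constructor
      · rintro (hs | ⟨o', ho', rfl, hx⟩)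
        · exact Or.inl hs
        · exact Or.inr ⟨o', Or.inr ho', rfl, hx⟩
      · rintro (hs | ⟨o', (rfl | ho'), rfl, hx⟩)
        · exact Or.inl hs
        · exact absurd ⟨hx.1, hx.2⟩ h
        · exact Or.inr ⟨o', ho', rfl, hx⟩

theorem pv_nodup_inner (total p : Int) :
    ∀ (l : List Int) (s : PySem.Set Int), s.Nodup →
      (l.foldl
          (fun s offset =>
            let candidate := p + offset
            if 1 ≤ candidate ∧ candidate ≤ total then PySem.Set.add s candidate else s) s).Nodup := by
  intro l
  induction l with
  | nil => intro s hs; simpa using hs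
  | cons o t ih =>
    intro s hs
    simp only [List.foldl_cons]
    split_ifs with h
    · exact ih _ (PySem.Set.nodup_add s (p + o) hs)
    · exact ih _ hs

-- membership / nodup of A's full set
theorem pv_mem_outer (total margin : Int) :
    ∀ (bs : List Int) (s : PySem.Set Int) (x : Int),
      (x ∈ bs.foldl
          (fun s p =>
            (PySem.List.pyRange (-margin) (margin + 1) 1).foldl
              (fun s offset =>
                let candidate := p + offset
                if 1 ≤ candidate ∧ candidate ≤ total then PySem.Set.add s candidate else s) s) s)
        ↔ x ∈ s ∨ ∃ p ∈ bs, p - margin ≤ x ∧ x ≤ p + margin ∧ 1 ≤ x ∧ x ≤ total := by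
  intro bs
  induction bs with
  | nil => simp
  | cons p t ih =>
    intro s x
    simp only [List.foldl_cons]
    rw [ih]
    simp only [pv_mem_inner, List.mem_cons, PySem.List.mem_pyRange_one]
    constructor
    · rintro ((hs | ⟨o, ho, rfl, hx⟩) | ⟨q, hq, h1, h2, h3⟩)
      · exact Or.inl hs
      · exact Or.inr ⟨p, Or.inl rfl, by omega⟩
      · exact Or.inr ⟨q, Or.inr hq, h1, h2, h3⟩
    · rintro (hs | ⟨q, (rfl | hq), h1, h2, h3, h4⟩)
      · exact Or.inl (Or.inl hs)
      · exact Or.inl (Or.inr ⟨x - q, by omega, by omega⟩)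
      · exact Or.inr ⟨q, hq, h1, h2, h3, h4⟩

theorem pv_nodup_outer (total margin : Int) :
    ∀ (bs : List Int) (s : PySem.Set Int), s.Nodup →
      (bs.foldl
          (fun s p =>
            (PySem.List.pyRange (-margin) (margin + 1) 1).foldl
              (fun s offset =>
                let candidate := p + offset
                if 1 ≤ candidate ∧ candidate ≤ total then PySem.Set.add s candidate else s) s) s).Nodup := by
  intro bs
  induction bs with
  | nil => intro s hs; simpa using hs
  | cons p t ih =>
    intro s hs
    simp only [List.foldl_cons]
    exact ih _ (pv_nodup_inner total p _ s hs)

-- B's sweep invariant: over a ≤-sorted list, the fold emits exactly the covered pages,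
-- strictly increasing, with the cursor past everything emitted
theorem pv_sweep (total margin : Int) :
    ∀ (l : List Int) (acc : List Int) (nxt : Int),
      l.Pairwise (· ≤ ·) → 1 ≤ nxt →
      acc.Pairwise (· < ·) → (∀ x ∈ acc, x < nxt) →
      (∀ p ∈ l, ∀ x : Int, p - margin ≤ x → x ≤ p + margin → 1 ≤ x → x ≤ total → x < nxt → x ∈ acc) →
      ((l.foldl
          (fun st p =>
            let lo := max (max st.2 (p - margin)) 1
            let hi := min (p + margin) total
            (st.1 ++ PySem.List.pyRange lo (hi + 1) 1, max st.2 (hi + 1)))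
          (acc, nxt)).1.Pairwise (· < ·)) ∧
      (∀ x : Int,
        x ∈ (l.foldl
          (fun st p =>
            let lo := max (max st.2 (p - margin)) 1
            let hi := min (p + margin) total
            (st.1 ++ PySem.List.pyRange lo (hi + 1) 1, max st.2 (hi + 1)))
          (acc, nxt)).1
        ↔ x ∈ acc ∨ ∃ p ∈ l, p - margin ≤ x ∧ x ≤ p + margin ∧ 1 ≤ x ∧ x ≤ total) := by
  intro l
  induction l with
  | nil => intro acc nxt _ _ hpw _ _; simpa using hpw
  | cons p t ih =>
    intro acc nxt hsor hnxt hpw hlt hcov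
    simp only [List.foldl_cons]
    have hple : ∀ q ∈ t, p ≤ q := fun q hq => (List.pairwise_cons.mp hsor).1 q hq
    have hsor' := (List.pairwise_cons.mp hsor).2
    -- the new accumulator / cursor
    set lo := max (max nxt (p - margin)) 1 with hlo
    set hi := min (p + margin) total with hhi
    have hrng : ∀ x : Int, x ∈ PySem.List.pyRange lo (hi + 1) 1 ↔ lo ≤ x ∧ x ≤ hi := by
      intro x; rw [PySem.List.mem_pyRange_one]; omega
    have hpw' : (acc ++ PySem.List.pyRange lo (hi + 1) 1).Pairwise (· < ·) := by
      rw [List.pairwise_append]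
      refine ⟨hpw, PySem.List.pairwise_lt_pyRange_one lo (hi+1), ?_⟩
      intro a ha b hb
      have := hlt a ha
      have := (hrng b).mp hb
      omega
    have hlt' : ∀ x ∈ acc ++ PySem.List.pyRange lo (hi + 1) 1, x < max nxt (hi + 1) := by
      intro x hx
      rcases List.mem_append.mp hx with hx | hx
      · have := hlt x hx; omega
      · have := (hrng x).mp hx; omega
    have hcov' : ∀ q ∈ t, ∀ x : Int, q - margin ≤ x → x ≤ q + margin → 1 ≤ x → x ≤ total →
        x < max nxt (hi + 1) → x ∈ acc ++ PySem.List.pyRange lo (hi + 1) 1 := by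
      intro q hq x h1 h2 h3 h4 h5
      by_cases hcase : x < nxt
      · exact List.mem_append.mpr (Or.inl (hcov q (List.mem_cons_of_mem p hq) x h1 h2 h3 h4 hcase))
      · refine List.mem_append.mpr (Or.inr ((hrng x).mpr ?_))
        have := hple q hq
        omega
    obtain ⟨hp1, hp2⟩ := ih (acc ++ PySem.List.pyRange lo (hi + 1) 1) (max nxt (hi + 1))
      hsor' (by omega) hpw' hlt' hcov'
    refine ⟨hp1, fun x => ?_⟩
    rw [hp2 x]
    simp only [List.mem_append, List.mem_cons, hrng x]
    constructor
    · rintro ((ha | hr) | ⟨q, hq, hx⟩)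
      · exact Or.inl ha
      · exact Or.inr ⟨p, Or.inl rfl, by omega⟩
      · exact Or.inr ⟨q, Or.inr hq, hx⟩
    · rintro (ha | ⟨q, (rfl | hq), h1, h2, h3, h4⟩)
      · exact Or.inl (Or.inl ha)
      · by_cases hcase : x < nxt
        · exact Or.inl (Or.inl (hcov q (List.mem_cons_self) x h1 h2 h3 h4 hcase))
        · exact Or.inl (Or.inr (by omega))
      · exact Or.inr ⟨q, hq, h1, h2, h3, h4⟩

-- ===== VERDICT (by name: the statement is the Claim_ definition above) =====
theorem expand_page_range_py_spec : Claim_equal_expand_page_range_py := by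
  intro base_pages total_pages margin _
  unfold Spec_expand_page_range_py expand_page_range_py expand_page_range_py_alt
  have hsorted_pw : (PySem.List.sorted base_pages (fun x => x) false).Pairwise (· ≤ ·) :=
    PySem.List.sorted_pairwise base_pages (fun x => x)
  obtain ⟨hBpw, hBmem⟩ := pv_sweep total_pages margin
    (PySem.List.sorted base_pages (fun x => x) false) [] 1
    hsorted_pw (le_refl 1) (List.Pairwise.nil) (by simp) (by intro p _ x _ _ h3 _ h5; omega)
  by_cases hnil : base_pages = []
  · subst hnil
    simp only []
    have : PySem.List.sorted ([] : List Int) (fun x => x) false = [] := rfl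
    rw [this]
    simp
  · rw [if_neg hnil]
    exact PySem.List.sorted_eq_of_perm_of_pairwise_lt _ _ _
      ((List.perm_ext_iff_of_nodup hBpw.nodup
          (pv_nodup_outer total_pages margin base_pages PySem.Set.empty (by simp [PySem.Set.empty]))).mpr
        (by
          intro x
          rw [hBmem x, pv_mem_outer total_pages margin base_pages PySem.Set.empty x]
          simp [PySem.List.mem_sorted, PySem.Set.empty]))
      hBpw
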